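-- pv_equiv track=rewrite | github.com/JGlims/JGlimsPlugin | schem_to_builder.py | find_runs_x
-- ===== SOURCE A (Python) =====
-- def find_runs_x(solids_by_y):
--     """Merge consecutive x-run of same material into fillBox runs. Returns list of
--     (mat, y, z, x1, x2) runs. solids_by_y[(y,z)] -> dict x -> mat."""
--     runs = []
--     for (y, z), xmap in solids_by_y.items():
--         xs = sorted(xmap.keys())
--         i = 0
--         while i < len(xs):
--             mat = xmap[xs[i]]
--             j = i
--             while j + 1 < len(xs) and xs[j+1] == xs[j] + 1 and xmap[xs[j+1]] == mat:
--                 j += 1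
--             runs.append((mat, y, z, xs[i], xs[j]))
--             i = j + 1
--     return runs
-- ===== SOURCE B (Python) =====
-- def find_runs_x(solids_by_y):
--     """Merge consecutive x-run of same material into fillBox runs. Returns list of
--     (mat, y, z, x1, x2) runs. solids_by_y[(y,z)] -> dict x -> mat."""
--     runs = []
--     for (y, z), xmap in solids_by_y.items():
--         cur = None  # open run: (mat, x1, x2)
--         for x in sorted(xmap):
--             mat = xmap[x]
--             if cur is not None and x == cur[2] + 1 and mat == cur[0]:
--                 cur = (cur[0], cur[1], x)
--             else:
--                 if cur is not None:
--                     runs.append((cur[0], y, z, cur[1], cur[2]))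
--                 cur = (mat, x, x)
--         if cur is not None:
--             runs.append((cur[0], y, z, cur[1], cur[2]))
--     return runs
-- ===== Notes on version B (the rewrite author's own statement) =====
-- stated objective: idiomatic
-- what changed: Replaces A's nested index-based while loops (inner lookahead scan to find the run end) by a single forward pass over the sorted keys that carries an open-run accumulator, extending it or flushing it at each element; no index arithmetic remains.
import Mathlib
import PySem

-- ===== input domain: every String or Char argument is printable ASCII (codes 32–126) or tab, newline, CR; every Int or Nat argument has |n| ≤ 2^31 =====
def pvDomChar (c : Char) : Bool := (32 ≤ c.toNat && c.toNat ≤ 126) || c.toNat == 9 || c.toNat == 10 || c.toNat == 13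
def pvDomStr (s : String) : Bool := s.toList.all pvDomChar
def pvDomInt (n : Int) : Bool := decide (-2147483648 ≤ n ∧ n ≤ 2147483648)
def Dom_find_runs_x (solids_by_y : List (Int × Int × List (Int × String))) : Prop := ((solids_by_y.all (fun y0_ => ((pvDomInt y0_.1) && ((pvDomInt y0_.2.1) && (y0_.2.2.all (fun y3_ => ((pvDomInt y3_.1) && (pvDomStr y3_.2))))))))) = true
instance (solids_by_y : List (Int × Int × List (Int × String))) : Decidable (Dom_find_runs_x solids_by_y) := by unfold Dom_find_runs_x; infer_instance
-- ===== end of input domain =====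

-- ===== PORT A =====
-- B replaces A's nested index-based while loops by a single forward pass carrying an
-- open-run accumulator (idiomatic run-merging); return values agree on every input.

-- inner while loop of A: extend j while the next x is consecutive with the same material
def pvAInner (xs : List Int) (xmap : PySem.Dict Int String) (mat : String) (j : Nat) : Nat :=
  if h : j + 1 < xs.length then
    if xs[j+1]! == xs[j]! + 1 && xmap.getD (xs[j+1]!) "" == mat then
      pvAInner xs xmap mat (j + 1)
    else j
  else j
termination_by xs.length - j

theorem pvAInner_ge (xs : List Int) (xmap : PySem.Dict Int String) (mat : String) (j : Nat) :
    j ≤ pvAInner xs xmap mat j := by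
  fun_induction pvAInner <;> omega

-- outer while loop of A over the run starts i
def pvAOuter (xs : List Int) (xmap : PySem.Dict Int String) (y z : Int) (i : Nat)
    (runs : List (String × Int × Int × Int × Int)) : List (String × Int × Int × Int × Int) :=
  if h : i < xs.length then
    let mat := xmap.getD (xs[i]!) ""
    let j := pvAInner xs xmap mat i
    pvAOuter xs xmap y z (j + 1) (runs ++ [(mat, y, z, xs[i]!, xs[j]!)])
  else runs
termination_by xs.length - i
decreasing_by have := pvAInner_ge xs xmap (xmap.getD (xs[i]!) "") i; omega

def find_runs_x (solids_by_y : List (Int × Int × List (Int × String))) :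
    List (String × Int × Int × Int × Int) :=
  solids_by_y.foldl (fun runs cell =>
    let xmap := PySem.Dict.mk cell.2.2
    let xs := PySem.List.sorted xmap.keys (fun x => x) false
    pvAOuter xs xmap cell.1 cell.2.1 0 runs) []

-- ===== PORT B =====
-- body of B's for loop: extend the open run or flush it and start a new one
def pvBStep (xmap : PySem.Dict Int String) (y z : Int)
    (st : Option (String × Int × Int) × List (String × Int × Int × Int × Int)) (x : Int) :
    Option (String × Int × Int) × List (String × Int × Int × Int × Int) :=
  let mat := xmap.getD x ""
  match st with
  | (some (m, x1, x2), runs) =>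
      if x == x2 + 1 && mat == m then (some (m, x1, x), runs)
      else (some (mat, x, x), runs ++ [(m, y, z, x1, x2)])
  | (none, runs) => (some (mat, x, x), runs)

-- B's trailing flush of the open run after the loop
def pvBFlush (y z : Int) (st : Option (String × Int × Int) × List (String × Int × Int × Int × Int)) :
    List (String × Int × Int × Int × Int) :=
  match st with
  | (some (m, x1, x2), runs) => runs ++ [(m, y, z, x1, x2)]
  | (none, runs) => runs

def find_runs_x_alt (solids_by_y : List (Int × Int × List (Int × String))) :
    List (String × Int × Int × Int × Int) :=
  solids_by_y.foldl (fun runs cell =>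
    let xmap := PySem.Dict.mk cell.2.2
    let xs := PySem.List.sorted xmap.keys (fun x => x) false
    pvBFlush cell.1 cell.2.1 (xs.foldl (pvBStep xmap cell.1 cell.2.1) (none, runs))) []

-- ===== PRECONDITION & SPEC =====
def Spec_find_runs_x (solids_by_y : List (Int × Int × List (Int × String))) (out : List (String × Int × Int × Int × Int)) : Prop := out = find_runs_x_alt solids_by_y
instance (solids_by_y : List (Int × Int × List (Int × String))) (out : List (String × Int × Int × Int × Int)) : Decidable (Spec_find_runs_x solids_by_y out) := by unfold Spec_find_runs_x; infer_instance

-- ===== CLAIM (what is proved, stated in full; the proofs are below) =====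
def Claim_equal_find_runs_x : Prop := ∀ (solids_by_y : List (Int × Int × List (Int × String))), Dom_find_runs_x solids_by_y → Spec_find_runs_x solids_by_y (find_runs_x solids_by_y)

-- ===== LEMMAS AND PROOFS =====

-- the maximal run starting with end-so-far x2: final end value and the untouched remainder
def pvSpan (xmap : PySem.Dict Int String) (m : String) (x2 : Int) : List Int → Int × List Int
  | [] => (x2, [])
  | a :: t => if a == x2 + 1 && xmap.getD a "" == m then pvSpan xmap m a t else (x2, a :: t)

theorem pvSpan_length_le (xmap : PySem.Dict Int String) (m : String) (x2 : Int) (l : List Int) :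
    (pvSpan xmap m x2 l).2.length ≤ l.length := by
  induction l generalizing m x2 with
  | nil => simp [pvSpan]
  | cons a t ih =>
    simp only [pvSpan]
    split
    · exact le_trans (ih _ _) (by simp)
    · simp

-- common characterisation: the run list produced for one (y,z) cell from a key list
def pvCellRuns (xmap : PySem.Dict Int String) (y z : Int) : List Int → List (String × Int × Int × Int × Int)
  | [] => []
  | x :: t =>
    let m := xmap.getD x ""
    let p := pvSpan xmap m x t
    (m, y, z, x, p.1) :: pvCellRuns xmap y z p.2
termination_by l => l.length
decreasing_by
  have := pvSpan_length_le xmap (xmap.getD x "") x t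
  simp at *; omega

theorem pvAInner_span (xs : List Int) (xmap : PySem.Dict Int String) (mat : String) (j : Nat) :
    pvSpan xmap mat (xs[j]!) (xs.drop (j + 1)) =
      (xs[pvAInner xs xmap mat j]!, xs.drop (pvAInner xs xmap mat j + 1)) := by
  fun_induction pvAInner with
  | case1 j h hc ih =>
    rw [List.drop_eq_getElem_cons h]
    simp only [pvSpan]
    rw [getElem!_pos xs (j+1) h] at hc
    rw [if_pos hc]
    rw [← getElem!_pos xs (j+1) h]
    exact ih
  | case2 j h hc =>
    rw [List.drop_eq_getElem_cons h]
    simp only [pvSpan]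
    rw [getElem!_pos xs (j+1) h] at hc
    rw [if_neg hc]
  | case3 j h =>
    rw [List.drop_eq_nil_of_le (by omega)]
    simp [pvSpan]

theorem pvAOuter_cellRuns (xs : List Int) (xmap : PySem.Dict Int String) (y z : Int) (i : Nat)
    (runs : List (String × Int × Int × Int × Int)) :
    pvAOuter xs xmap y z i runs = runs ++ pvCellRuns xmap y z (xs.drop i) := by
  fun_induction pvAOuter with
  | case1 i runs h mat j ih =>
    simp only [mat, j] at ih ⊢
    rw [ih, List.drop_eq_getElem_cons h]
    simp only [pvCellRuns]
    rw [← getElem!_pos xs i h, pvAInner_span xs xmap (xmap.getD (xs[i]!) "") i]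
    simp
  | case2 i runs h =>
    rw [List.drop_eq_nil_of_le (by omega)]
    simp [pvCellRuns]

theorem pvBFold_some (xmap : PySem.Dict Int String) (y z : Int) (l : List Int)
    (m : String) (x1 x2 : Int) (runs : List (String × Int × Int × Int × Int)) :
    pvBFlush y z (l.foldl (pvBStep xmap y z) (some (m, x1, x2), runs)) =
      runs ++ (m, y, z, x1, (pvSpan xmap m x2 l).1) :: pvCellRuns xmap y z (pvSpan xmap m x2 l).2 := by
  induction l generalizing m x1 x2 runs with
  | nil => simp [pvBFlush, pvSpan, pvCellRuns]
  | cons a t ih =>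
    simp only [List.foldl_cons, pvBStep, pvSpan]
    split
    · rw [ih]
    · rw [ih]
      simp only [pvCellRuns]
      simp

theorem pvBFold_none (xmap : PySem.Dict Int String) (y z : Int) (l : List Int)
    (runs : List (String × Int × Int × Int × Int)) :
    pvBFlush y z (l.foldl (pvBStep xmap y z) (none, runs)) = runs ++ pvCellRuns xmap y z l := by
  cases l with
  | nil => simp [pvBFlush, pvCellRuns]
  | cons a t =>
    simp only [List.foldl_cons, pvBStep, pvBFold_some, pvCellRuns]

-- ===== VERDICT (by name: the statement is the Claim_ definition above) =====
theorem find_runs_x_spec : Claim_equal_find_runs_x := by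
  intro s _
  unfold Spec_find_runs_x find_runs_x find_runs_x_alt
  congr 1
  funext runs cell
  rw [pvBFold_none, pvAOuter_cellRuns, List.drop_zero]
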